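-- pv_equiv track=rewrite | github.com/Homiez09/cs112-65-1 | Lab14_FINAL/03.py | mixName
-- ===== SOURCE A (Python) =====
-- def mixName(n1, n2):
--     vowel = ['a', 'e', 'i', 'o', 'u']
--     species = ""
--
--     count = 2
--     for i in range(len(n1)):
--         if n1[i] in vowel:
--             count -= 1
--         if count == 0:
--             break
--         species += n1[i]
--
--     count = 1
--     for i in range(len(n2)):
--         if n2[i] in vowel:
--             count -= 1
--         if count == 0:
--             species += n2[i+1:]
--             break
--
--     if count == 1:
--         species += n2
--
--     return species
-- ===== SOURCE B (Python) =====
-- def mixName(n1, n2):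
--     vowels = ('a', 'e', 'i', 'o', 'u')
--     v1 = [i for i, c in enumerate(n1) if c in vowels]
--     v2 = [i for i, c in enumerate(n2) if c in vowels]
--     part1 = n1[:v1[1]] if len(v1) >= 2 else n1
--     part2 = n2[v2[0] + 1:] if v2 else n2
--     return part1 + part2
-- ===== Notes on version B (the rewrite author's own statement) =====
-- stated objective: simpler
-- what changed: Replaced A's two counter-driven early-break loops that accumulate characters one by one with building the lists of vowel positions in each name once and cutting the names by slicing (before the second vowel of n1, after the first vowel of n2).
import Mathlib
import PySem

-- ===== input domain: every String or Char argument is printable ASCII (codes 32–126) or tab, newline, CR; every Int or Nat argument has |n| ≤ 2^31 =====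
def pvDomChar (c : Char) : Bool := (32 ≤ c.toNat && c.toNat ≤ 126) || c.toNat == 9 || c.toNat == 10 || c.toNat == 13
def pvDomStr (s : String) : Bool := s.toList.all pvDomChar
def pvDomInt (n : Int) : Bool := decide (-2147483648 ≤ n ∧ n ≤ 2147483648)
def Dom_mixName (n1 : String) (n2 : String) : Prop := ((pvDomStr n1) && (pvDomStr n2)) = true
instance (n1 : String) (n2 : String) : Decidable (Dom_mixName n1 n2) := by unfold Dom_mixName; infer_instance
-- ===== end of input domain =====

-- B replaces A's two counter-driven early-break character-accumulating loops by
-- building vowel-position index lists once and slicing the names (simpler decomposition).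

def pvIsVowel (c : Char) : Bool := c = 'a' || c = 'e' || c = 'i' || c = 'o' || c = 'u'

-- ===== PORT A =====
-- first loop of A: copy chars of n1 until the counter (start 2, decremented at vowels) hits 0
def mixLoop1 : List Char → Int → List Char
  | [], _ => []
  | c :: cs, count =>
      let count' := if pvIsVowel c then count - 1 else count
      if count' = 0 then [] else c :: mixLoop1 cs count'

-- second loop of A: on the first vowel return the rest of n2 (= n2[i+1:]) with count 0;
-- falling off the end leaves count unchanged
def mixLoop2 : List Char → Int → List Char × Int
  | [], count => ([], count)
  | c :: cs, count =>
      let count' := if pvIsVowel c then count - 1 else count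
      if count' = 0 then (cs, count') else mixLoop2 cs count'

def mixName (n1 : String) (n2 : String) : String :=
  let s1 := mixLoop1 n1.toList 2
  let r := mixLoop2 n2.toList 1
  let s2 := if r.2 = 1 then n2.toList else r.1
  String.ofList (s1 ++ s2)

-- ===== PORT B =====
-- [i for i, c in enumerate(s) if c in vowels]
def pvIdxList (s : String) : List Int :=
  ((PySem.List.enumerate s.toList 0).filter (fun p => pvIsVowel p.2)).map (·.1)

def mixName_alt (n1 : String) (n2 : String) : String :=
  let v1 := pvIdxList n1
  let v2 := pvIdxList n2
  let part1 := match v1 with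
    | _ :: j :: _ => PySem.List.slice n1.toList none (some j)   -- n1[:v1[1]]
    | _ => n1.toList
  let part2 := match v2 with
    | j :: _ => PySem.List.slice n2.toList (some (j + 1)) none  -- n2[v2[0]+1:]
    | [] => n2.toList
  String.ofList (part1 ++ part2)

-- ===== PRECONDITION & SPEC =====
def Spec_mixName (n1 : String) (n2 : String) (out : String) : Prop := out = mixName_alt n1 n2
instance (n1 : String) (n2 : String) (out : String) : Decidable (Spec_mixName n1 n2 out) := by unfold Spec_mixName; infer_instance

-- ===== CLAIM (what is proved, stated in full; the proofs are below) =====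
def Claim_equal_mixName : Prop := ∀ (n1 : String) (n2 : String), Dom_mixName n1 n2 → Spec_mixName n1 n2 (mixName n1 n2)

-- ===== LEMMAS AND PROOFS =====

-- natural vowel positions, structurally
def nIdx : List Char → List Nat
  | [] => []
  | c :: cs => if pvIsVowel c then 0 :: (nIdx cs).map (· + 1) else (nIdx cs).map (· + 1)

theorem idxList_eq (cs : List Char) (s : Int) :
    ((PySem.List.enumerate cs s).filter (fun p => pvIsVowel p.2)).map (·.1)
      = (nIdx cs).map (fun k : Nat => (k : Int) + s) := by
  induction cs generalizing s with
  | nil => simp [nIdx]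
  | cons c cs ih =>
      rw [PySem.List.enumerate_cons]
      by_cases h : pvIsVowel c = true
      · rw [nIdx, if_pos h, List.filter_cons_of_pos (by simpa using h), List.map_cons, ih (s + 1),
          List.map_cons, List.map_map]
        refine List.cons_eq_cons.mpr ⟨by ring, ?_⟩
        apply List.map_congr_left; intro k _
        simp only [Function.comp_apply]; push_cast; ring
      · rw [nIdx, if_neg h, List.filter_cons_of_neg (by simpa using h), ih (s + 1),
          List.map_map]
        apply List.map_congr_left; intro k _
        simp only [Function.comp_apply]; push_cast; ring

theorem pvIdxList_eq (s : String) :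
    pvIdxList s = (nIdx s.toList).map (fun k : Nat => (k : Int)) := by
  rw [pvIdxList, idxList_eq]; simp

theorem loop1_one (cs : List Char) :
    mixLoop1 cs 1 = match nIdx cs with
      | k :: _ => cs.take k
      | [] => cs := by
  induction cs with
  | nil => simp [mixLoop1, nIdx]
  | cons c cs ih =>
      by_cases h : pvIsVowel c = true
      · simp [mixLoop1, nIdx, h]
      · cases hn : nIdx cs <;> simp [mixLoop1, nIdx, h, ih, hn]

theorem loop1_two (cs : List Char) :
    mixLoop1 cs 2 = match nIdx cs with
      | _ :: k :: _ => cs.take k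
      | _ => cs := by
  induction cs with
  | nil => simp [mixLoop1, nIdx]
  | cons c cs ih =>
      by_cases h : pvIsVowel c = true
      · cases hn : nIdx cs with
        | nil => simp [mixLoop1, nIdx, h, loop1_one, hn]
        | cons k t => simp [mixLoop1, nIdx, h, loop1_one, hn]
      · cases hn : nIdx cs with
        | nil => simp [mixLoop1, nIdx, h, hn, ih]
        | cons k t => cases t <;> simp [mixLoop1, nIdx, h, hn, ih]

theorem loop2_one (cs : List Char) :
    mixLoop2 cs 1 = match nIdx cs with
      | k :: _ => (cs.drop (k + 1), 0)
      | [] => ([], 1) := by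
  induction cs with
  | nil => simp [mixLoop2, nIdx]
  | cons c cs ih =>
      by_cases h : pvIsVowel c = true
      · simp [mixLoop2, nIdx, h]
      · cases hn : nIdx cs <;> simp [mixLoop2, nIdx, h, hn, ih]

-- ===== VERDICT (by name: the statement is the Claim_ definition above) =====
theorem mixName_spec : Claim_equal_mixName := by
  intro n1 n2 _
  show mixName n1 n2 = mixName_alt n1 n2
  rw [mixName, mixName_alt, pvIdxList_eq, pvIdxList_eq, loop1_two, loop2_one]
  cases h1 : nIdx n1.toList with
  | nil =>
      cases h2 : nIdx n2.toList with
      | nil => simp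
      | cons k t =>
          simp only [List.map_cons, List.map_nil]
          rw [show ((k : Int) + 1) = (((k + 1 : Nat)) : Int) from by push_cast; ring,
            PySem.List.slice_from_natCast]
          simp
  | cons k1 t1 =>
      cases t1 with
      | nil =>
          cases h2 : nIdx n2.toList with
          | nil => simp
          | cons k t =>
              simp only [List.map_cons, List.map_nil]
              rw [show ((k : Int) + 1) = (((k + 1 : Nat)) : Int) from by push_cast; ring,
                PySem.List.slice_from_natCast]
              simp
      | cons k2 t2 =>
          cases h2 : nIdx n2.toList with
          | nil =>
              simp only [List.map_cons, List.map_nil]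
              rw [PySem.List.slice_to_natCast]
              simp
          | cons k t =>
              simp only [List.map_cons]
              rw [show ((k : Int) + 1) = (((k + 1 : Nat)) : Int) from by push_cast; ring,
                PySem.List.slice_to_natCast, PySem.List.slice_from_natCast]
              simp
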